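-- pv_equiv track=rewrite | github.com/BlueBlazin/pyrs | scripts/probe_stdlib_full.py | map_tests_for_modules
-- ===== SOURCE A (Python) =====
-- def module_candidate_keys(module: str) -> set[str]:
--     keys = {module.replace(".", "_")}
--     top = module.split(".")[0]
--     keys.add(top.replace(".", "_"))
--     if module.startswith("_"):
--         keys.add(module.lstrip("_").replace(".", "_"))
--     if top.startswith("_"):
--         keys.add(top.lstrip("_").replace(".", "_"))
--     if "." in module:
--         tail = module.split(".")[-1]
--         keys.add(tail.replace(".", "_"))
--         if tail.startswith("_"):
--             keys.add(tail.lstrip("_").replace(".", "_"))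
--     return {key for key in keys if key}
--
-- def map_tests_for_modules(stdlib_modules: list[str], test_modules: list[str]) -> dict[str, list[str]]:
--     mapped: dict[str, list[str]] = {}
--     test_names = [name.split(".", 1)[1] for name in test_modules if "." in name]
--     for module in stdlib_modules:
--         keys = module_candidate_keys(module)
--         selected: list[str] = []
--         for full_name, short_name in zip(test_modules, test_names, strict=False):
--             for key in keys:
--                 exact = f"test_{key}"
--                 prefix = f"test_{key}_"
--                 if short_name == exact or short_name.startswith(prefix):
--                     selected.append(full_name)
--                     break
--         mapped[module] = sorted(set(selected))
--     return mapped
-- ===== SOURCE B (Python) =====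
-- def _candidate_keys(module):
--     parts = module.split(".")
--     bases = [module, parts[0], parts[-1]] if "." in module else [module, parts[0]]
--     keys = set()
--     for base in bases:
--         for k in (base, base.lstrip("_")):
--             kk = k.replace(".", "_")
--             if kk:
--                 keys.add(kk)
--     return keys
--
-- def map_tests_for_modules(stdlib_modules, test_modules):
--     test_names = [name.split(".", 1)[1] for name in test_modules if "." in name]
--     entries = []
--     for full_name, short_name in zip(test_modules, test_names):
--         if short_name.startswith("test_"):
--             rest = short_name[5:]
--             for key in [rest] + [rest[:i] for i, ch in enumerate(rest) if ch == "_"]: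
--                 if key:
--                     entries.append((key, full_name))
--     index = {}
--     for key, full_name in entries:
--         index.setdefault(key, []).append(full_name)
--     return {module: sorted({name for key in _candidate_keys(module) for name in index.get(key, [])})
--             for module in stdlib_modules}
-- ===== Notes on version B (the rewrite author's own statement) =====
-- stated objective: alternative
-- what changed: Instead of rescanning every test module and trying a string-prefix match per candidate key for each stdlib module (A), B makes one pass over the tests building an inverted index from each test's underscore-boundary key prefixes to its full name, then answers each module by dictionary lookups over its candidate keys.
import Mathlib
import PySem

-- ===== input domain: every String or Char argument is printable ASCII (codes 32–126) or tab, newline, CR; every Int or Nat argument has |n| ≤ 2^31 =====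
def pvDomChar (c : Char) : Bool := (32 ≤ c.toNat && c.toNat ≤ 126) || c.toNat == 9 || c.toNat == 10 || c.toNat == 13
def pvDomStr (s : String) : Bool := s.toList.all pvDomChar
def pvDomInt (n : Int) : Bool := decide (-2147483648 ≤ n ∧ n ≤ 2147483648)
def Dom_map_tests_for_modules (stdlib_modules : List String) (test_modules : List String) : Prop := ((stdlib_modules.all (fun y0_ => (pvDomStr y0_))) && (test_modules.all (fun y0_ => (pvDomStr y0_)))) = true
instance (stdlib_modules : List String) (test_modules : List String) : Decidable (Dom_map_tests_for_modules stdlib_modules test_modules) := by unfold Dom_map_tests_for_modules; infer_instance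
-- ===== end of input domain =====

-- B replaces A's per-module rescan of all tests (with a prefix test per candidate key) by one inverted
-- index from each test's underscore-boundary key prefixes to its full name, looked up per module.

-- shared primitive: s.lstrip("_") (exact: drops the leading '_' characters; PySem has no lstrip-with-chars)
def pyLstripUnderscore (s : String) : String := String.ofList (s.toList.dropWhile (fun c => c == '_'))

-- ===== PORT A =====
def module_candidate_keys (module : String) : PySem.Set String :=
  -- keys = {module.replace(".", "_")}
  let keys : PySem.Set String := PySem.Set.ofList [PySem.Str.replace module "." "_"]
  -- top = module.split(".")[0]   (sep "." is nonempty so split? is never none; [0] exists)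
  let top : String := ((PySem.Str.split? module ".").getD [module]).headD ""
  let keys := PySem.Set.add keys (PySem.Str.replace top "." "_")
  let keys := if PySem.Str.startswith module "_" then PySem.Set.add keys (PySem.Str.replace (pyLstripUnderscore module) "." "_") else keys
  let keys := if PySem.Str.startswith top "_" then PySem.Set.add keys (PySem.Str.replace (pyLstripUnderscore top) "." "_") else keys
  let keys := if PySem.Str.isIn "." module then
      let tail : String := ((PySem.Str.split? module ".").getD [module]).getLastD ""
      let keys := PySem.Set.add keys (PySem.Str.replace tail "." "_")
      if PySem.Str.startswith tail "_" then PySem.Set.add keys (PySem.Str.replace (pyLstripUnderscore tail) "." "_") else keys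
    else keys
  -- {key for key in keys if key}
  PySem.Set.ofList (keys.filter (fun k => !(k == "")))

def map_tests_for_modules (stdlib_modules : List String) (test_modules : List String) : List (String × List String) :=
  -- test_names = [name.split(".", 1)[1] for name in test_modules if "." in name]
  let test_names : List String :=
    (test_modules.filter (fun name => PySem.Str.isIn "." name)).map
      (fun name => (PySem.List.pyGet? ((PySem.Str.splitMax? name "." 1).getD [name]) 1).getD "")
  let mapped : PySem.Dict String (List String) :=
    stdlib_modules.foldl (fun mapped module =>
      let keys := module_candidate_keys module
      -- 'for key in keys: if …: selected.append(full_name); break' appends full_name once iff some key matches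
      let selected : List String :=
        (test_modules.zip test_names).foldl (fun selected fs =>
          if keys.any (fun key => fs.2 == "test_" ++ key || PySem.Str.startswith fs.2 ("test_" ++ key ++ "_"))
          then selected ++ [fs.1] else selected) []
      mapped.insert module (PySem.List.sorted (PySem.Set.ofList selected) (fun x => x) false))
    PySem.Dict.empty
  mapped.items

-- ===== PORT B =====
-- inner loop 'for k in (base, base.lstrip("_")): …' of _candidate_keys, extracted as a helper
def add_base_keys (keys : PySem.Set String) (base : String) : PySem.Set String :=
  [base, pyLstripUnderscore base].foldl (fun keys k =>
    let kk := PySem.Str.replace k "." "_"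
    if !(kk == "") then PySem.Set.add keys kk else keys) keys

def candidate_keys_alt (module : String) : PySem.Set String :=
  let parts := (PySem.Str.split? module ".").getD [module]
  let bases := if PySem.Str.isIn "." module then [module, parts.headD "", parts.getLastD ""] else [module, parts.headD ""]
  bases.foldl add_base_keys PySem.Set.empty

def map_tests_for_modules_alt (stdlib_modules : List String) (test_modules : List String) : List (String × List String) :=
  let test_names : List String :=
    (test_modules.filter (fun name => PySem.Str.isIn "." name)).map
      (fun name => (PySem.List.pyGet? ((PySem.Str.splitMax? name "." 1).getD [name]) 1).getD "")
  -- entries: (underscore-boundary key prefix of short_name, full_name) pairs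
  let entries : List (String × String) :=
    (test_modules.zip test_names).foldl (fun acc fs =>
      if PySem.Str.startswith fs.2 "test_" then
        let rest : List Char := PySem.List.slice fs.2.toList (some 5) none
        ([rest] ++ ((PySem.List.enumerate rest).filter (fun p => p.2 == '_')).map
            (fun p => PySem.List.slice rest none (some p.1))).foldl
          (fun acc key => if !(key == ([] : List Char)) then acc ++ [(String.ofList key, fs.1)] else acc) acc
      else acc) []
  -- index: key -> [full_name, …] via dict.setdefault(key, []).append(full_name)
  let index : PySem.Dict String (List String) :=
    entries.foldl (fun index e => index.modify e.1 [] (fun v => v ++ [e.2])) PySem.Dict.empty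
  let mapped : PySem.Dict String (List String) :=
    stdlib_modules.foldl (fun mapped module =>
      mapped.insert module (PySem.List.sorted (PySem.Set.ofList
        ((candidate_keys_alt module).flatMap (fun key => index.getD key []))) (fun x => x) false))
    PySem.Dict.empty
  mapped.items

-- ===== PRECONDITION & SPEC =====
def Spec_map_tests_for_modules (stdlib_modules : List String) (test_modules : List String) (out : List (String × List String)) : Prop := out = map_tests_for_modules_alt stdlib_modules test_modules
instance (stdlib_modules : List String) (test_modules : List String) (out : List (String × List String)) : Decidable (Spec_map_tests_for_modules stdlib_modules test_modules out) := by unfold Spec_map_tests_for_modules; infer_instance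

-- ===== CLAIM (what is proved, stated in full; the proofs are below) =====
def Claim_equal_map_tests_for_modules : Prop := ∀ (stdlib_modules : List String) (test_modules : List String), Dom_map_tests_for_modules stdlib_modules test_modules → Spec_map_tests_for_modules stdlib_modules test_modules (map_tests_for_modules stdlib_modules test_modules)

-- ===== LEMMAS AND PROOFS =====

theorem lstrip_eq_self (s : String) (h : PySem.Str.startswith s "_" = false) : pyLstripUnderscore s = s := by
  rw [String.ext_iff]
  simp only [pyLstripUnderscore, String.toList_ofList]
  simp only [PySem.Str.startswith_eq] at h
  rw [Bool.eq_false_iff, Ne, PySem.Chars.startswith_iff] at h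
  cases hs : s.toList with
  | nil => simp
  | cons c t =>
    rw [hs] at h
    rw [List.dropWhile_cons]
    have : ¬ (c == '_') = true := by
      intro hc
      exact h (by simp at hc; simp [hc, List.cons_prefix_cons])
    simp [this]
-- ===== PORT A =====
-- ===== PORT B =====
theorem memB_pair (keys : PySem.Set String) (base x : String) :
    x ∈ add_base_keys keys base ↔
      x ∈ keys ∨ (x ≠ "" ∧ (x = PySem.Str.replace base "." "_" ∨ x = PySem.Str.replace (pyLstripUnderscore base) "." "_")) := by
  simp only [add_base_keys, List.foldl]
  by_cases hb : PySem.Str.replace base "." "_" = ""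
  case pos =>
    by_cases hb2 : PySem.Str.replace (pyLstripUnderscore base) "." "_" = ""
    case pos => simp [hb, hb2]
    case neg =>
      simp [PySem.Set.mem_add, hb, hb2]
      constructor
      · rintro (h | h)
        · exact Or.inl h
        · exact Or.inr ⟨h ▸ hb2, Or.inr h⟩
      · rintro (h | ⟨hne, (h | h)⟩)
        · exact Or.inl h
        · exact absurd h hne
        · exact Or.inr h
  case neg =>
    by_cases hb2 : PySem.Str.replace (pyLstripUnderscore base) "." "_" = ""
    case pos =>
      simp [PySem.Set.mem_add, hb, hb2]
      constructor
      · rintro (h | h)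
        · exact Or.inl h
        · exact Or.inr ⟨h ▸ hb, Or.inl h⟩
      · rintro (h | ⟨hne, (h | h)⟩)
        · exact Or.inl h
        · exact Or.inr h
        · exact absurd h hne
    case neg =>
      simp [PySem.Set.mem_add, hb, hb2]
      constructor
      · rintro ((h | h) | h)
        · exact Or.inl h
        · exact Or.inr ⟨h ▸ hb, Or.inl h⟩
        · exact Or.inr ⟨h ▸ hb2, Or.inr h⟩
      · rintro (h | ⟨hne, (h | h)⟩)
        · exact Or.inl (Or.inl h)
        · exact Or.inl (Or.inr h)
        · exact Or.inr h

theorem memB (m x : String) :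
    x ∈ candidate_keys_alt m ↔
      x ≠ "" ∧ (x = PySem.Str.replace m "." "_" ∨ x = PySem.Str.replace (pyLstripUnderscore m) "." "_" ∨
        x = PySem.Str.replace (((PySem.Str.split? m ".").getD [m]).headD "") "." "_" ∨
        x = PySem.Str.replace (pyLstripUnderscore (((PySem.Str.split? m ".").getD [m]).headD "")) "." "_" ∨
        (PySem.Str.isIn "." m = true ∧
          (x = PySem.Str.replace (((PySem.Str.split? m ".").getD [m]).getLastD "") "." "_" ∨
           x = PySem.Str.replace (pyLstripUnderscore (((PySem.Str.split? m ".").getD [m]).getLastD "")) "." "_"))) := by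
  rcases Bool.eq_false_or_eq_true (PySem.Str.isIn "." m) with hdot | hdot <;>
  simp only [candidate_keys_alt, hdot, Bool.false_eq_true, reduceIte, List.foldl_cons, List.foldl_nil,
    memB_pair, PySem.Set.empty, List.not_mem_nil, false_or] <;>
  aesop

theorem memA' (m x : String) :
    x ∈ module_candidate_keys m ↔
      x ≠ "" ∧ (x = PySem.Str.replace m "." "_" ∨ x = PySem.Str.replace (pyLstripUnderscore m) "." "_" ∨
        x = PySem.Str.replace (((PySem.Str.split? m ".").getD [m]).headD "") "." "_" ∨
        x = PySem.Str.replace (pyLstripUnderscore (((PySem.Str.split? m ".").getD [m]).headD "")) "." "_" ∨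
        (PySem.Str.isIn "." m = true ∧
          (x = PySem.Str.replace (((PySem.Str.split? m ".").getD [m]).getLastD "") "." "_" ∨
           x = PySem.Str.replace (pyLstripUnderscore (((PySem.Str.split? m ".").getD [m]).getLastD "")) "." "_"))) := by
  have E : ∀ (s : String), PySem.Str.startswith s "_" = false → PySem.Str.replace (pyLstripUnderscore s) "." "_" = PySem.Str.replace s "." "_" :=
    fun s h => congrArg (fun t => PySem.Str.replace t "." "_") (lstrip_eq_self s h)
  rcases Bool.eq_false_or_eq_true (PySem.Str.startswith m "_") with h1 | h1 <;>
  rcases Bool.eq_false_or_eq_true (PySem.Str.startswith (((PySem.Str.split? m ".").getD [m]).headD "") "_") with h2 | h2 <;>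
  rcases Bool.eq_false_or_eq_true (PySem.Str.startswith (((PySem.Str.split? m ".").getD [m]).getLastD "") "_") with h3 | h3
  · rcases Bool.eq_false_or_eq_true (PySem.Str.isIn "." m) with hdot | hdot <;>
    simp only [module_candidate_keys, h1, h2, h3, hdot, Bool.false_eq_true, reduceIte] <;>
    simp [PySem.Set.mem_ofList, List.mem_filter, PySem.Set.mem_add] <;>
    (try generalize PySem.Str.replace m "." "_" = A1) <;>
    (try generalize PySem.Str.replace (pyLstripUnderscore m) "." "_" = A2) <;>
    (try generalize PySem.Str.replace (((PySem.Str.split? m ".").getD [m]).head?.getD "") "." "_" = A3) <;>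
    (try generalize PySem.Str.replace (pyLstripUnderscore (((PySem.Str.split? m ".").getD [m]).head?.getD "")) "." "_" = A4) <;>
    (try generalize PySem.Str.replace (((PySem.Str.split? m ".").getD [m]).getLast?.getD "") "." "_" = A5) <;>
    (try generalize PySem.Str.replace (pyLstripUnderscore (((PySem.Str.split? m ".").getD [m]).getLast?.getD "")) "." "_" = A6) <;>
    clear E h1 h2 h3 hdot <;>
    tauto
  · rw [E (((PySem.Str.split? m ".").getD [m]).getLastD "") h3]
    rcases Bool.eq_false_or_eq_true (PySem.Str.isIn "." m) with hdot | hdot <;>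
    simp only [module_candidate_keys, h1, h2, h3, hdot, Bool.false_eq_true, reduceIte] <;>
    simp [PySem.Set.mem_ofList, List.mem_filter, PySem.Set.mem_add] <;>
    (try generalize PySem.Str.replace m "." "_" = A1) <;>
    (try generalize PySem.Str.replace (pyLstripUnderscore m) "." "_" = A2) <;>
    (try generalize PySem.Str.replace (((PySem.Str.split? m ".").getD [m]).head?.getD "") "." "_" = A3) <;>
    (try generalize PySem.Str.replace (pyLstripUnderscore (((PySem.Str.split? m ".").getD [m]).head?.getD "")) "." "_" = A4) <;>
    (try generalize PySem.Str.replace (((PySem.Str.split? m ".").getD [m]).getLast?.getD "") "." "_" = A5) <;>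
    (try generalize PySem.Str.replace (pyLstripUnderscore (((PySem.Str.split? m ".").getD [m]).getLast?.getD "")) "." "_" = A6) <;>
    clear E h1 h2 h3 hdot <;>
    tauto
  · rw [E (((PySem.Str.split? m ".").getD [m]).headD "") h2]
    rcases Bool.eq_false_or_eq_true (PySem.Str.isIn "." m) with hdot | hdot <;>
    simp only [module_candidate_keys, h1, h2, h3, hdot, Bool.false_eq_true, reduceIte] <;>
    simp [PySem.Set.mem_ofList, List.mem_filter, PySem.Set.mem_add] <;>
    (try generalize PySem.Str.replace m "." "_" = A1) <;>
    (try generalize PySem.Str.replace (pyLstripUnderscore m) "." "_" = A2) <;>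
    (try generalize PySem.Str.replace (((PySem.Str.split? m ".").getD [m]).head?.getD "") "." "_" = A3) <;>
    (try generalize PySem.Str.replace (pyLstripUnderscore (((PySem.Str.split? m ".").getD [m]).head?.getD "")) "." "_" = A4) <;>
    (try generalize PySem.Str.replace (((PySem.Str.split? m ".").getD [m]).getLast?.getD "") "." "_" = A5) <;>
    (try generalize PySem.Str.replace (pyLstripUnderscore (((PySem.Str.split? m ".").getD [m]).getLast?.getD "")) "." "_" = A6) <;>
    clear E h1 h2 h3 hdot <;>
    tauto
  · rw [E (((PySem.Str.split? m ".").getD [m]).headD "") h2, E (((PySem.Str.split? m ".").getD [m]).getLastD "") h3]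
    rcases Bool.eq_false_or_eq_true (PySem.Str.isIn "." m) with hdot | hdot <;>
    simp only [module_candidate_keys, h1, h2, h3, hdot, Bool.false_eq_true, reduceIte] <;>
    simp [PySem.Set.mem_ofList, List.mem_filter, PySem.Set.mem_add] <;>
    (try generalize PySem.Str.replace m "." "_" = A1) <;>
    (try generalize PySem.Str.replace (pyLstripUnderscore m) "." "_" = A2) <;>
    (try generalize PySem.Str.replace (((PySem.Str.split? m ".").getD [m]).head?.getD "") "." "_" = A3) <;>
    (try generalize PySem.Str.replace (pyLstripUnderscore (((PySem.Str.split? m ".").getD [m]).head?.getD "")) "." "_" = A4) <;>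
    (try generalize PySem.Str.replace (((PySem.Str.split? m ".").getD [m]).getLast?.getD "") "." "_" = A5) <;>
    (try generalize PySem.Str.replace (pyLstripUnderscore (((PySem.Str.split? m ".").getD [m]).getLast?.getD "")) "." "_" = A6) <;>
    clear E h1 h2 h3 hdot <;>
    tauto
  · rw [E m h1]
    rcases Bool.eq_false_or_eq_true (PySem.Str.isIn "." m) with hdot | hdot <;>
    simp only [module_candidate_keys, h1, h2, h3, hdot, Bool.false_eq_true, reduceIte] <;>
    simp [PySem.Set.mem_ofList, List.mem_filter, PySem.Set.mem_add] <;>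
    (try generalize PySem.Str.replace m "." "_" = A1) <;>
    (try generalize PySem.Str.replace (pyLstripUnderscore m) "." "_" = A2) <;>
    (try generalize PySem.Str.replace (((PySem.Str.split? m ".").getD [m]).head?.getD "") "." "_" = A3) <;>
    (try generalize PySem.Str.replace (pyLstripUnderscore (((PySem.Str.split? m ".").getD [m]).head?.getD "")) "." "_" = A4) <;>
    (try generalize PySem.Str.replace (((PySem.Str.split? m ".").getD [m]).getLast?.getD "") "." "_" = A5) <;>
    (try generalize PySem.Str.replace (pyLstripUnderscore (((PySem.Str.split? m ".").getD [m]).getLast?.getD "")) "." "_" = A6) <;>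
    clear E h1 h2 h3 hdot <;>
    tauto
  · rw [E m h1, E (((PySem.Str.split? m ".").getD [m]).getLastD "") h3]
    rcases Bool.eq_false_or_eq_true (PySem.Str.isIn "." m) with hdot | hdot <;>
    simp only [module_candidate_keys, h1, h2, h3, hdot, Bool.false_eq_true, reduceIte] <;>
    simp [PySem.Set.mem_ofList, List.mem_filter, PySem.Set.mem_add] <;>
    (try generalize PySem.Str.replace m "." "_" = A1) <;>
    (try generalize PySem.Str.replace (pyLstripUnderscore m) "." "_" = A2) <;>
    (try generalize PySem.Str.replace (((PySem.Str.split? m ".").getD [m]).head?.getD "") "." "_" = A3) <;>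
    (try generalize PySem.Str.replace (pyLstripUnderscore (((PySem.Str.split? m ".").getD [m]).head?.getD "")) "." "_" = A4) <;>
    (try generalize PySem.Str.replace (((PySem.Str.split? m ".").getD [m]).getLast?.getD "") "." "_" = A5) <;>
    (try generalize PySem.Str.replace (pyLstripUnderscore (((PySem.Str.split? m ".").getD [m]).getLast?.getD "")) "." "_" = A6) <;>
    clear E h1 h2 h3 hdot <;>
    tauto
  · rw [E m h1, E (((PySem.Str.split? m ".").getD [m]).headD "") h2]
    rcases Bool.eq_false_or_eq_true (PySem.Str.isIn "." m) with hdot | hdot <;>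
    simp only [module_candidate_keys, h1, h2, h3, hdot, Bool.false_eq_true, reduceIte] <;>
    simp [PySem.Set.mem_ofList, List.mem_filter, PySem.Set.mem_add] <;>
    (try generalize PySem.Str.replace m "." "_" = A1) <;>
    (try generalize PySem.Str.replace (pyLstripUnderscore m) "." "_" = A2) <;>
    (try generalize PySem.Str.replace (((PySem.Str.split? m ".").getD [m]).head?.getD "") "." "_" = A3) <;>
    (try generalize PySem.Str.replace (pyLstripUnderscore (((PySem.Str.split? m ".").getD [m]).head?.getD "")) "." "_" = A4) <;>
    (try generalize PySem.Str.replace (((PySem.Str.split? m ".").getD [m]).getLast?.getD "") "." "_" = A5) <;>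
    (try generalize PySem.Str.replace (pyLstripUnderscore (((PySem.Str.split? m ".").getD [m]).getLast?.getD "")) "." "_" = A6) <;>
    clear E h1 h2 h3 hdot <;>
    tauto
  · rw [E m h1, E (((PySem.Str.split? m ".").getD [m]).headD "") h2, E (((PySem.Str.split? m ".").getD [m]).getLastD "") h3]
    rcases Bool.eq_false_or_eq_true (PySem.Str.isIn "." m) with hdot | hdot <;>
    simp only [module_candidate_keys, h1, h2, h3, hdot, Bool.false_eq_true, reduceIte] <;>
    simp [PySem.Set.mem_ofList, List.mem_filter, PySem.Set.mem_add] <;>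
    (try generalize PySem.Str.replace m "." "_" = A1) <;>
    (try generalize PySem.Str.replace (pyLstripUnderscore m) "." "_" = A2) <;>
    (try generalize PySem.Str.replace (((PySem.Str.split? m ".").getD [m]).head?.getD "") "." "_" = A3) <;>
    (try generalize PySem.Str.replace (pyLstripUnderscore (((PySem.Str.split? m ".").getD [m]).head?.getD "")) "." "_" = A4) <;>
    (try generalize PySem.Str.replace (((PySem.Str.split? m ".").getD [m]).getLast?.getD "") "." "_" = A5) <;>
    (try generalize PySem.Str.replace (pyLstripUnderscore (((PySem.Str.split? m ".").getD [m]).getLast?.getD "")) "." "_" = A6) <;>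
    clear E h1 h2 h3 hdot <;>
    tauto

theorem keys_mem (m x : String) : x ∈ module_candidate_keys m ↔ x ∈ candidate_keys_alt m :=
  (memA' m x).trans (memB m x).symm

theorem keys_ne_empty (m x : String) (h : x ∈ module_candidate_keys m) : x ≠ "" :=
  ((memA' m x).1 h).1

theorem core2 (T X L : List Char) : (T ++ X) <+: L ↔ T <+: L ∧ X <+: L.drop T.length := by
  constructor
  · rintro ⟨t, ht⟩
    subst ht
    refine ⟨⟨X ++ t, by simp⟩, ?_⟩
    rw [List.append_assoc, List.drop_left]
    exact List.prefix_append _ _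
  · rintro ⟨⟨t, ht⟩, hx⟩
    subst ht
    rw [List.drop_left] at hx
    obtain ⟨u, hu⟩ := hx
    exact ⟨u, by rw [List.append_assoc, hu]⟩

theorem core1 (L K T : List Char) (h5 : T.length = 5) : L = T ++ K ↔ (T <+: L ∧ L.drop 5 = K) := by
  constructor
  · rintro rfl
    exact ⟨List.prefix_append _ _, by rw [← h5, List.drop_left]⟩
  · rintro ⟨⟨t, ht⟩, hd⟩
    subst ht
    rw [← h5, List.drop_left] at hd
    rw [hd]

theorem core3 (K R : List Char) : (K ++ ['_']) <+: R ↔ ∃ i : Nat, i < R.length ∧ R[i]? = some '_' ∧ K = R.take i := by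
  constructor
  · rintro ⟨t, ht⟩
    refine ⟨K.length, ?_, ?_, ?_⟩
    · rw [← ht]; simp
    · rw [← ht, List.append_assoc, List.getElem?_append_right (le_refl _)]
      simp
    · rw [← ht, List.append_assoc, List.take_left]
  · rintro ⟨i, hi, hc, rfl⟩
    refine ⟨R.drop (i+1), ?_⟩
    have hdrop : R.drop i = R[i] :: R.drop (i+1) := List.drop_eq_getElem_cons hi
    have hR : R.take i ++ R.drop i = R := List.take_append_drop i R
    rw [List.getElem?_eq_getElem hi] at hc
    simp at hc
    rw [List.append_assoc]
    calc R.take i ++ (['_'] ++ R.drop (i+1)) = R.take i ++ R.drop i := by rw [hdrop, hc]; rfl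
      _ = R := hR

def pvRest (s : String) : List Char := PySem.List.slice s.toList (some 5) none

def pvKeyList (s : String) : List (List Char) :=
  [pvRest s] ++ ((PySem.List.enumerate (pvRest s)).filter (fun p => p.2 == '_')).map
    (fun p => PySem.List.slice (pvRest s) none (some p.1))

theorem pvRest_eq (s : String) : pvRest s = s.toList.drop 5 := by
  rw [pvRest, PySem.List.slice_from _ (by norm_num : (0:Int) ≤ 5)]
  rfl

theorem mem_enumerate' {α : Type} (xs : List α) (p : Int × α) :
    p ∈ PySem.List.enumerate xs 0 ↔ ∃ k : Nat, xs[k]? = some p.2 ∧ p.1 = (k : Int) := by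
  rw [List.mem_iff_getElem?]
  constructor
  · rintro ⟨k, hk⟩
    rw [PySem.List.getElem?_enumerate] at hk
    cases hx : xs[k]? with
    | none => rw [hx] at hk; simp at hk
    | some a =>
      rw [hx] at hk
      simp at hk
      exact ⟨k, by rw [hx, ← hk], by rw [← hk]⟩
  · rintro ⟨k, hk, hp⟩
    refine ⟨k, ?_⟩
    rw [PySem.List.getElem?_enumerate, hk]
    simp
    exact Prod.ext (by simp [hp]) rfl

theorem mem_keyList (s : String) (kl : List Char) :
    kl ∈ pvKeyList s ↔ kl = s.toList.drop 5 ∨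
      ∃ i : Nat, i < (s.toList.drop 5).length ∧ (s.toList.drop 5)[i]? = some '_' ∧ kl = (s.toList.drop 5).take i := by
  rw [pvKeyList]
  simp only [List.cons_append, List.nil_append, List.mem_cons, List.mem_map, List.mem_filter, pvRest_eq]
  constructor
  · rintro (h | ⟨p, ⟨hp, hus⟩, rfl⟩)
    · exact Or.inl h
    · rw [mem_enumerate'] at hp
      obtain ⟨k, hk, hp1⟩ := hp
      refine Or.inr ⟨k, ?_, ?_, ?_⟩
      · exact (List.getElem?_eq_some_iff.mp hk).1
      · rw [hk]; simp at hus; rw [hus]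
      · rw [hp1, PySem.List.slice_to _ (by positivity)]; simp
  · rintro (h | ⟨i, hi, hc, rfl⟩)
    · exact Or.inl h
    · refine Or.inr ⟨((i : Int), '_'), ⟨?_, by simp⟩, ?_⟩
      · rw [mem_enumerate']
        exact ⟨i, by simp [hc], rfl⟩
      · rw [PySem.List.slice_to _ (by positivity)]; simp

theorem match_iff (s key : String) :
    (s == "test_" ++ key || PySem.Str.startswith s ("test_" ++ key ++ "_")) = true ↔
    (PySem.Str.startswith s "test_" = true ∧ ∃ kl ∈ pvKeyList s, String.ofList kl = key) := by
  have hofl : ∀ kl : List Char, String.ofList kl = key ↔ kl = key.toList := by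
    intro kl
    rw [String.ext_iff, String.toList_ofList]
  have hT : ("test_").toList.length = 5 := by decide
  rw [Bool.or_eq_true, beq_iff_eq, PySem.Str.startswith_eq, PySem.Chars.startswith_iff,
    PySem.Str.startswith_eq, PySem.Chars.startswith_iff]
  have h1 : s = "test_" ++ key ↔ s.toList = "test_".toList ++ key.toList := by
    rw [String.ext_iff, String.toList_append]
  have h2 : ("test_" ++ key ++ "_").toList = "test_".toList ++ (key.toList ++ ['_']) := by
    rw [String.toList_append, String.toList_append, List.append_assoc]
    rfl
  rw [h1, h2, core1 _ _ _ hT, core2, hT, core3]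
  constructor
  · rintro (⟨hp, hd⟩ | ⟨hp, ⟨i, hi, hc, hk⟩⟩)
    · exact ⟨hp, s.toList.drop 5, (mem_keyList s _).mpr (Or.inl rfl), (hofl _).mpr hd⟩
    · exact ⟨hp, (s.toList.drop 5).take i, (mem_keyList s _).mpr (Or.inr ⟨i, hi, hc, rfl⟩), (hofl _).mpr hk.symm⟩
  · rintro ⟨hp, kl, hmem, hkey⟩
    rw [hofl] at hkey
    rcases (mem_keyList s _).mp hmem with h | ⟨i, hi, hc, h⟩
    · exact Or.inl ⟨hp, by rw [← hkey, h]⟩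
    · exact Or.inr ⟨hp, i, hi, hc, by rw [← hkey, h]⟩

def pvEntry (fs : String × String) : List (String × String) :=
  if PySem.Str.startswith fs.2 "test_" then
    ((pvKeyList fs.2).filter (fun k => !(k == ([] : List Char)))).map (fun k => (String.ofList k, fs.1))
  else []

theorem pvKeyList_unfold (fs : String × String) :
    [PySem.List.slice fs.2.toList (some 5) none] ++ ((PySem.List.enumerate (PySem.List.slice fs.2.toList (some 5) none)).filter (fun p => p.2 == '_')).map
      (fun p => PySem.List.slice (PySem.List.slice fs.2.toList (some 5) none) none (some p.1)) = pvKeyList fs.2 := rfl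

theorem entries_eq (P : List (String × String)) :
    P.foldl (fun acc fs =>
      if PySem.Str.startswith fs.2 "test_" then
        let rest : List Char := PySem.List.slice fs.2.toList (some 5) none
        ([rest] ++ ((PySem.List.enumerate rest).filter (fun p => p.2 == '_')).map
            (fun p => PySem.List.slice rest none (some p.1))).foldl
          (fun acc key => if !(key == ([] : List Char)) then acc ++ [(String.ofList key, fs.1)] else acc) acc
      else acc) [] = P.flatMap pvEntry := by
  simp only []
  have hbody : ∀ (acc : List (String × String)) (fs : String × String),
      (if PySem.Str.startswith fs.2 "test_" then
        ([PySem.List.slice fs.2.toList (some 5) none] ++ ((PySem.List.enumerate (PySem.List.slice fs.2.toList (some 5) none)).filter (fun p => p.2 == '_')).map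
            (fun p => PySem.List.slice (PySem.List.slice fs.2.toList (some 5) none) none (some p.1))).foldl
          (fun acc key => if !(key == ([] : List Char)) then acc ++ [(String.ofList key, fs.1)] else acc) acc
      else acc) = acc ++ pvEntry fs := by
    intro acc fs
    rw [pvKeyList_unfold]
    by_cases h : PySem.Str.startswith fs.2 "test_" = true
    · rw [if_pos h, pvEntry, if_pos h,
        PySem.List.foldl_append_if (p := fun key => !(key == ([] : List Char)))
          (f := fun key => (String.ofList key, fs.1))]
    · rw [if_neg h, pvEntry, if_neg h, List.append_nil]
  rw [PySem.List.foldl_congr_mem _ _ (fun acc fs => acc ++ pvEntry fs) _ (fun acc fs _ => hbody acc fs)]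
  rw [PySem.List.foldl_append_eq_flatMap]
  rfl

theorem sortedSet_congr (LA LB : List String) (h : ∀ x, x ∈ LA ↔ x ∈ LB) :
    PySem.List.sorted (PySem.Set.ofList LA) (fun x => x) false
      = PySem.List.sorted (PySem.Set.ofList LB) (fun x => x) false := by
  apply PySem.List.sorted_eq_sorted_of_perm
  · exact fun a b hab => hab
  · exact (List.perm_ext_iff_of_nodup (PySem.Set.nodup_ofList _) (PySem.Set.nodup_ofList _)).mpr
      (fun a => by rw [PySem.Set.mem_ofList, PySem.Set.mem_ofList, h a])

theorem mem_pvEntry (fs : String × String) (e : String × String) :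
    e ∈ pvEntry fs ↔ PySem.Str.startswith fs.2 "test_" = true ∧
      ∃ kl ∈ pvKeyList fs.2, kl ≠ [] ∧ e = (String.ofList kl, fs.1) := by
  rw [pvEntry]
  by_cases h : PySem.Str.startswith fs.2 "test_" = true
  · rw [if_pos h]
    simp only [List.mem_map, List.mem_filter, h, true_and]
    constructor
    · rintro ⟨kl, ⟨hmem, hne⟩, rfl⟩
      exact ⟨kl, hmem, by simpa using hne, rfl⟩
    · rintro ⟨kl, hmem, hne, rfl⟩
      exact ⟨kl, ⟨hmem, by simpa using hne⟩, rfl⟩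
  · rw [if_neg h]
    simp only [List.not_mem_nil, false_iff]
    rintro ⟨hs, -⟩
    exact h hs

theorem selA_mem (keys : PySem.Set String) (P : List (String × String)) (x : String) :
    x ∈ P.foldl (fun selected fs =>
        if keys.any (fun key => fs.2 == "test_" ++ key || PySem.Str.startswith fs.2 ("test_" ++ key ++ "_"))
        then selected ++ [fs.1] else selected) [] ↔
      ∃ fs ∈ P, (keys.any (fun key => fs.2 == "test_" ++ key || PySem.Str.startswith fs.2 ("test_" ++ key ++ "_"))) = true ∧ fs.1 = x := by
  rw [PySem.List.foldl_append_if
    (p := fun fs : String × String => keys.any (fun key => fs.2 == "test_" ++ key || PySem.Str.startswith fs.2 ("test_" ++ key ++ "_")))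
    (f := fun fs : String × String => fs.1)]
  simp only [List.nil_append, List.mem_map, List.mem_filter]
  constructor
  · rintro ⟨fs, ⟨hP, hc⟩, rfl⟩
    exact ⟨fs, hP, hc, rfl⟩
  · rintro ⟨fs, hP, hc, rfl⟩
    exact ⟨fs, ⟨hP, hc⟩, rfl⟩


theorem colB_mem (P : List (String × String)) (idx : PySem.Dict String (List String)) (m x : String)
    (hidx : ∀ k, idx.getD k [] = ((P.flatMap pvEntry).filter (fun e => e.1 == k)).map (fun e => e.2)) :
    x ∈ (candidate_keys_alt m).flatMap (fun key => idx.getD key []) ↔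
      ∃ fs ∈ P, PySem.Str.startswith fs.2 "test_" = true ∧
        ∃ kl ∈ pvKeyList fs.2, kl ≠ [] ∧ String.ofList kl ∈ candidate_keys_alt m ∧ fs.1 = x := by
  simp only [List.mem_flatMap, hidx, List.mem_map, List.mem_filter, List.mem_flatMap]
  constructor
  · rintro ⟨k, hk, e, ⟨⟨fs, hfs, he⟩, hek⟩, rfl⟩
    rw [mem_pvEntry] at he
    obtain ⟨hst, kl, hkl, hne, rfl⟩ := he
    rw [beq_iff_eq] at hek
    exact ⟨fs, hfs, hst, kl, hkl, hne, by have : String.ofList kl = k := hek; rw [this]; exact hk, rfl⟩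
  · rintro ⟨fs, hfs, hst, kl, hkl, hne, hmem, rfl⟩
    refine ⟨String.ofList kl, hmem, (String.ofList kl, fs.1), ⟨⟨fs, hfs, ?_⟩, by simp⟩, rfl⟩
    rw [mem_pvEntry]
    exact ⟨hst, kl, hkl, hne, rfl⟩

theorem per_module (P : List (String × String)) (idx : PySem.Dict String (List String)) (m : String)
    (hidx : ∀ k, idx.getD k [] = ((P.flatMap pvEntry).filter (fun e => e.1 == k)).map (fun e => e.2)) :
    PySem.List.sorted (PySem.Set.ofList (P.foldl (fun selected fs =>
        if (module_candidate_keys m).any (fun key => fs.2 == "test_" ++ key || PySem.Str.startswith fs.2 ("test_" ++ key ++ "_"))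
        then selected ++ [fs.1] else selected) [])) (fun x => x) false
    = PySem.List.sorted (PySem.Set.ofList ((candidate_keys_alt m).flatMap (fun key => idx.getD key []))) (fun x => x) false := by
  apply sortedSet_congr
  intro x
  rw [selA_mem, colB_mem P idx m x hidx]
  constructor
  · rintro ⟨fs, hfs, hc, rfl⟩
    rw [List.any_eq_true] at hc
    obtain ⟨key, hkeyA, hmatch⟩ := hc
    rw [match_iff] at hmatch
    obtain ⟨hst, kl, hklmem, hklkey⟩ := hmatch
    have hkne : key ≠ "" := keys_ne_empty m key hkeyA
    have hklne : kl ≠ [] := fun h => hkne (by rw [← hklkey, h])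
    exact ⟨fs, hfs, hst, kl, hklmem, hklne, by rw [hklkey]; exact (keys_mem m key).mp hkeyA, rfl⟩
  · rintro ⟨fs, hfs, hst, kl, hklmem, hklne, hmem, rfl⟩
    refine ⟨fs, hfs, ?_, rfl⟩
    rw [List.any_eq_true]
    refine ⟨String.ofList kl, (keys_mem m _).mpr hmem, ?_⟩
    rw [match_iff]
    exact ⟨hst, kl, hklmem, rfl⟩

-- ===== VERDICT (by name: the statement is the Claim_ definition above) =====
theorem map_tests_for_modules_spec : Claim_equal_map_tests_for_modules := by
  intro stdlib_modules test_modules _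
  unfold Spec_map_tests_for_modules
  unfold map_tests_for_modules map_tests_for_modules_alt
  simp only []
  apply congrArg PySem.Dict.items
  apply PySem.List.foldl_congr_mem
  intro acc m _
  apply congrArg (PySem.Dict.insert acc m)
  rw [entries_eq]
  exact per_module _ _ m (fun k => by
    rw [PySem.Dict.getD_foldl_modify_append]
    simp [PySem.Dict.getD_empty])
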